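-- pv_equiv track=rewrite | github.com/mzefic/Repo | 14.11.py | prime_misses
-- ===== SOURCE A (Python) =====
-- def merge4(x, y):
--     result = []
--     xi = 0
--     yi = 0
--
--     while xi < (len(x)):
--         if x[xi] not in y:
--             result.append(x[xi])
--         xi += 1
--     result.sort()
--     return result
--
-- def merge2(x, y):
--     result = []
--     xi = 0
--     yi = 0
--
--     while xi < (len(x)):
--         if x[xi] not in y:
--             result.append(x[xi])
--         xi += 1
--     result.extend(y[yi:])
--     result.sort()
--     return result
--
-- def primes_in(x):
--     i = 0
--     g = 0
--     result = []
--     while i < len(x):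
--         if x[i] == 0:
--             i += 1
--             continue
--         if x[i] == 2:
--             result.append(x[i])
--             i += 1
--             continue
--         for g in range(2, x[i]):
--             if (x[i] % g) == 0:
--                 i += 1
--                 break
--             else:
--                 result.append(x[i])
--                 i += 1
--                 break
--     return result
--
-- def primesN(x):
--     result = []
--     for num in range(49):
--         if num > 1:
--             for i in range(2,num):
--                 if (num % i) == 0:
--                     break
--             else:
--                 result.append(num)
--     return result
--
-- def prime_misses(x):
--     result = []
--     num = 49
--     primesPresent = []
--     primes = primesN(num)
--     xi = 0
--     i = 0
--     for i in range(len(x)):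
--         primesPresent.append(primes_in(x[i]))
--     for xi in range(len(primesPresent)):
--         if xi == (len(primesPresent)-1):
--             break
--         else:
--             result.extend(merge2(primesPresent[xi], primesPresent[xi+1]))
--     result.sort()
--     primesMissing = merge4(primes, result)
--     return primesMissing
-- ===== SOURCE B (Python) =====
-- def prime_misses(x):
--     # Sieve of Eratosthenes for the primes below 49, then one linear union pass
--     # over all sublists, filtering the primes against the combined set once.
--     limit = 49
--     is_p = [True] * limit
--     is_p[0] = is_p[1] = False
--     for p in range(2, limit):
--         if is_p[p]:
--             for m in range(p * p, limit, p):
--                 is_p[m] = False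
--     present = set()
--     for sub in x:
--         present.update(sub)
--     return [n for n in range(limit) if is_p[n] and n not in present]
-- ===== Notes on version B (the rewrite author's own statement) =====
-- stated objective: alternative
-- what changed: Replaces A's trial-division prime list and its overlapping adjacent merge2/merge4 membership-scan pipeline with a sieve of Eratosthenes plus one linear union of all sublists into a set, filtering the primes once; Pre_ excludes inputs on which A loops forever (a sublist element equal to 1 or negative makes primes_in's while loop never advance).
-- intended difference: On inputs with exactly one sublist that contains a prime below 49, A's adjacent-pair merge loop breaks immediately and ignores that lone sublist, so A returns all 15 primes below 49, while B returns the primes absent from that sublist, which is the intended 'primes missing'. — e.g. on prime_misses([[2]]): A returns [2, 3, 5, 7, 11, 13, 17, 19, 23, 29, 31, 37, 41, 43, 47], B returns [3, 5, 7, 11, 13, 17, 19, 23, 29, 31, 37, 41, 43, 47]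
import Mathlib
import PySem

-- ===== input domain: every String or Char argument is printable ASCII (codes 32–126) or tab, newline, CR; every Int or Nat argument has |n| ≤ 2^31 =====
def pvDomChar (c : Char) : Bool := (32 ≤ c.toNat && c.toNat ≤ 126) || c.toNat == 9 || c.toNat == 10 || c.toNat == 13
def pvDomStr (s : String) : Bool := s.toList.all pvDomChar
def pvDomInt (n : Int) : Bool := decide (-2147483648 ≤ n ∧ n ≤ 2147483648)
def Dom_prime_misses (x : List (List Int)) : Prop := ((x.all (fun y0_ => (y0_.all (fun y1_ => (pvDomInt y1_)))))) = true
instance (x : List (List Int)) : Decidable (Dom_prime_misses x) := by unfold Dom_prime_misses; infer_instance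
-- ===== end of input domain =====

-- B replaces A's trial-division primes and adjacent merge2/merge4 scans by a sieve
-- plus one set-union pass over all sublists (objective: alternative algorithm);
-- on single-sublist inputs A ignores the sublist and B counts it (see D_ below).

-- ===== PORT A =====
-- merge4: while loop appending x[xi] when not in y, then .sort()
def pm_merge4 (x y : List Int) : List Int :=
  let result := x.foldl (fun r e => if y.contains e then r else r ++ [e]) []
  PySem.List.sorted result (fun v => v) false

-- merge2: same loop, then result.extend(y[0:]) and .sort()
def pm_merge2 (x y : List Int) : List Int :=
  let result := x.foldl (fun r e => if y.contains e then r else r ++ [e]) []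
  PySem.List.sorted (result ++ y) (fun v => v) false

-- primes_in: index loop; for v not 0 or 2 the inner for-loop runs exactly once
-- with g = 2 and breaks either way when range(2, v) is nonempty (v > 2);
-- when v = 1 or v < 0 the range is empty, so i never advances and Python loops
-- forever: the port keeps that non-advancing step and bounds it with fuel
-- (fuel only makes the same computation total; Pre_ excludes the diverging inputs).
def pm_pi_go : Nat → List Int → List Int
  | 0, _ => []
  | _ + 1, [] => []
  | f + 1, v :: rest =>
    if v = 0 then pm_pi_go f rest
    else if v = 2 then v :: pm_pi_go f rest
    else if 2 < v then
      if PySem.Int.mod v 2 = 0 then pm_pi_go f rest else v :: pm_pi_go f rest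
    else pm_pi_go f (v :: rest)

def pm_primes_in (x : List Int) : List Int := pm_pi_go (x.length + 1) x

-- primesN: trial division over range(49) with a for-else append
def pm_primesN (x : Int) : List Int :=
  (PySem.List.pyRange 0 49 1).foldl (fun r num =>
    if 1 < num then
      if (PySem.List.pyRange 2 num 1).all (fun i => !(PySem.Int.mod num i == 0)) then r ++ [num]
      else r
    else r) []

-- the second for loop of prime_misses, with its break at xi == len-1
def pm_loop (pp : List (List Int)) : List Int → List Int → List Int
  | [], result => result
  | xi :: rest, result =>
    if xi = (pp.length : Int) - 1 then result
    else pm_loop pp rest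
      (result ++ pm_merge2 (PySem.List.pyGetD pp xi []) (PySem.List.pyGetD pp (xi + 1) []))

def prime_misses (x : List (List Int)) : List Int :=
  let primes := pm_primesN 49
  let primesPresent := x.foldl (fun pp sub => pp ++ [pm_primes_in sub]) []
  let result := pm_loop primesPresent (PySem.List.pyRange 0 primesPresent.length 1) []
  let result := PySem.List.sorted result (fun v => v) false
  pm_merge4 primes result

-- ===== PORT B =====
-- sieve of Eratosthenes on a boolean list; every index touched is a nonnegative
-- in-range Nat, so List.set/getD are exact ports of the Python list accesses
def alt_sieve : List Bool :=
  let isp := ((List.replicate 49 true).set 0 false).set 1 false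
  (PySem.List.pyRange 2 49 1).foldl (fun a p =>
    if a.getD p.toNat false then
      (PySem.List.pyRange (p * p) 49 p).foldl (fun a2 m => a2.set m.toNat false) a
    else a) isp

def prime_misses_alt (x : List (List Int)) : List Int :=
  let isp := alt_sieve
  let present : PySem.Set Int :=
    x.foldl (fun s sub => PySem.Set.update s sub) PySem.Set.empty
  (PySem.List.pyRange 0 49 1).filter
    (fun n => isp.getD n.toNat false && !(PySem.Set.contains present n))

-- ===== PRECONDITION & SPEC =====
-- Pre_ excludes exactly the inputs on which Python A never returns: if some sublist
-- contains an element equal to 1 or negative, primes_in's while loop stops advancing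
-- (range(2, v) is empty) and A diverges.
def Pre_prime_misses (x : List (List Int)) : Prop :=
  ∀ sub ∈ x, ∀ v ∈ sub, v = 0 ∨ 2 ≤ v
instance (x : List (List Int)) : Decidable (Pre_prime_misses x) := by
  unfold Pre_prime_misses; infer_instance

def pvWitness_prime_misses : List (List Int) := [[2, 9, 0], [5, 4], [47]]

-- the primes below 49 (used by D_ and the proofs)
def Plit : List Int := [2, 3, 5, 7, 11, 13, 17, 19, 23, 29, 31, 37, 41, 43, 47]

-- On inputs with exactly one sublist that contains a prime below 49, A's
-- adjacent-pair merge loop breaks immediately and ignores that lone sublist, so A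
-- returns all 15 primes below 49, while B returns the primes absent from that
-- sublist, which is the intended "primes missing".
def D_prime_misses (x : List (List Int)) : Prop :=
  x.length = 1 ∧ ∃ p ∈ Plit, p ∈ x.headD []
instance (x : List (List Int)) : Decidable (D_prime_misses x) := by
  unfold D_prime_misses; infer_instance

def Spec_prime_misses (x : List (List Int)) (out : List Int) : Prop :=
  ¬ D_prime_misses x → out = prime_misses_alt x
instance (x : List (List Int)) (out : List Int) : Decidable (Spec_prime_misses x out) := by
  unfold Spec_prime_misses; infer_instance

def pvDiffWitness_prime_misses : List (List Int) := [[2]]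
def pvDiffWitnessOut_prime_misses : (List Int) × (List Int) :=
  ([2, 3, 5, 7, 11, 13, 17, 19, 23, 29, 31, 37, 41, 43, 47],
   [3, 5, 7, 11, 13, 17, 19, 23, 29, 31, 37, 41, 43, 47])

-- ===== CLAIM (what is proved, stated in full; the proofs are below) =====
def Claim_unchanged_prime_misses : Prop :=
  ∀ (x : List (List Int)), Dom_prime_misses x → Pre_prime_misses x →
    Spec_prime_misses x (prime_misses x)
def Claim_changed_prime_misses : Prop :=
  Dom_prime_misses (pvDiffWitness_prime_misses) ∧ Pre_prime_misses (pvDiffWitness_prime_misses) ∧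
  D_prime_misses (pvDiffWitness_prime_misses) ∧
  prime_misses (pvDiffWitness_prime_misses) = pvDiffWitnessOut_prime_misses.1 ∧
  prime_misses_alt (pvDiffWitness_prime_misses) = pvDiffWitnessOut_prime_misses.2 ∧
  pvDiffWitnessOut_prime_misses.1 ≠ pvDiffWitnessOut_prime_misses.2
def Claim_exact_prime_misses : Prop :=
  ∀ (x : List (List Int)), Dom_prime_misses x → Pre_prime_misses x →
    D_prime_misses x → prime_misses x ≠ prime_misses_alt x

-- ===== LEMMAS AND PROOFS =====

-- proof-side structural form of primes_in on inputs satisfying Pre_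
def pm_pi_rec : List Int → List Int
  | [] => []
  | v :: rest =>
    if v = 0 then pm_pi_rec rest
    else if v = 2 then v :: pm_pi_rec rest
    else if 2 < v then
      if PySem.Int.mod v 2 = 0 then pm_pi_rec rest else v :: pm_pi_rec rest
    else pm_pi_rec rest

-- under Pre_ the fuel never runs out and the non-advancing branch is never taken
theorem pi_go_eq : ∀ (fuel : Nat) (sub : List Int), (∀ v ∈ sub, v = 0 ∨ 2 ≤ v) →
    sub.length < fuel → pm_pi_go fuel sub = pm_pi_rec sub := by
  intro fuel
  induction fuel with
  | zero => intro sub _ h; omega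
  | succ f ih =>
    intro sub hpre hlen
    match sub with
    | [] => rfl
    | v :: rest =>
      have hv := hpre v (by simp)
      have hrest : ∀ w ∈ rest, w = 0 ∨ 2 ≤ w := fun w hw => hpre w (by simp [hw])
      have hlen' : rest.length < f := by simp at hlen; omega
      simp only [pm_pi_go, pm_pi_rec]
      split_ifs with h0 h2 h3 h4
      · exact ih rest hrest hlen'
      · rw [ih rest hrest hlen']
      · exact ih rest hrest hlen'
      · rw [ih rest hrest hlen']
      · exfalso; omega

theorem primes_in_eq (sub : List Int) (hpre : ∀ v ∈ sub, v = 0 ∨ 2 ≤ v) :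
    pm_primes_in sub = pm_pi_rec sub :=
  pi_go_eq (sub.length + 1) sub hpre (by omega)

theorem hPrimes : pm_primesN 49 = Plit := by decide

set_option maxRecDepth 4000 in
theorem hSieve :
    (PySem.List.pyRange 0 49 1).filter (fun n => alt_sieve.getD n.toNat false) = Plit := by
  decide

theorem filter_and (l : List Int) (p q : Int → Bool) :
    l.filter (fun n => p n && q n) = (l.filter p).filter q := by
  induction l with
  | nil => rfl
  | cons a t ih => by_cases hp : p a <;> by_cases hq : q a <;> simp [hp, hq, ih]

-- the while loop shared by merge2/merge4 is a filter
theorem merge_fold (y l : List Int) (acc : List Int) :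
    l.foldl (fun r e => if y.contains e then r else r ++ [e]) acc
      = acc ++ l.filter (fun e => !(y.contains e)) := by
  induction l generalizing acc with
  | nil => simp
  | cons a t ih =>
    rw [List.foldl_cons, List.filter_cons]
    by_cases h : y.contains a = true
    · rw [if_pos h, if_neg (by simpa using h : ¬((!y.contains a) = true)), ih]
    · rw [if_neg h, if_pos (by simpa using h : (!y.contains a) = true), ih]
      simp

theorem mem_merge2 (p : Int) (A B : List Int) :
    p ∈ pm_merge2 A B ↔ p ∈ A ∨ p ∈ B := by
  unfold pm_merge2
  rw [merge_fold]
  simp [PySem.List.mem_sorted, List.mem_filter]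
  tauto

theorem merge4_P (y : List Int) :
    pm_merge4 Plit y = Plit.filter (fun e => !(y.contains e)) := by
  unfold pm_merge4
  rw [merge_fold, List.nil_append]
  apply PySem.List.sorted_eq_self_of_pairwise
  have h : Plit.Pairwise (· < ·) := by decide
  exact (h.filter _).imp (fun hlt => le_of_lt hlt)

theorem mem_primes_in (p : Int) (hp : p = 2 ∨ (2 < p ∧ PySem.Int.mod p 2 ≠ 0)) :
    ∀ sub : List Int, (p ∈ pm_pi_rec sub ↔ p ∈ sub) := by
  intro sub
  induction sub with
  | nil => simp [pm_pi_rec]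
  | cons v rest ih =>
    have hp2 : 2 ≤ p := by rcases hp with h | h; omega; omega
    unfold pm_pi_rec
    split_ifs with h0 h2 h3 h4
    · simp [ih]; intro hpv; exfalso; omega
    · simp [ih]
    · simp [ih]; intro hpv; exfalso; subst hpv
      rcases hp with h | h; omega; exact h.2 h4
    · simp [ih]
    · simp [ih]; intro hpv; exfalso; omega

theorem mem_foldl_update (x : List (List Int)) (p : Int) :
    ∀ s : PySem.Set Int,
      (p ∈ x.foldl (fun s sub => PySem.Set.update s sub) s ↔ p ∈ s ∨ ∃ sub ∈ x, p ∈ sub) := by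
  induction x with
  | nil => simp
  | cons a t ih =>
    intro s
    simp only [List.foldl_cons, ih, PySem.Set.mem_update, List.mem_cons]
    constructor
    · rintro (( h | h) | ⟨sub, hs, hm⟩)
      · exact Or.inl h
      · exact Or.inr ⟨a, Or.inl rfl, h⟩
      · exact Or.inr ⟨sub, Or.inr hs, hm⟩
    · rintro (h | ⟨sub, (rfl | hs), hm⟩)
      · exact Or.inl (Or.inl h)
      · exact Or.inl (Or.inr hm)
      · exact Or.inr ⟨sub, hs, hm⟩

-- the break-at-(len-1) loop, characterised as a flatMap over range(0, len-1)
theorem pm_loop_eq (pp : List (List Int)) :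
    ∀ (m : Nat) (k : Int), (((pp.length : Int)) - k).toNat = m → ∀ acc,
      pm_loop pp (PySem.List.pyRange k (pp.length : Int) 1) acc
        = acc ++ (PySem.List.pyRange k ((pp.length : Int) - 1) 1).flatMap
            (fun i => pm_merge2 (PySem.List.pyGetD pp i []) (PySem.List.pyGetD pp (i + 1) [])) := by
  intro m
  induction m with
  | zero =>
    intro k hk acc
    have h1 : (pp.length : Int) ≤ k := by omega
    rw [PySem.List.pyRange_one_eq_nil h1, PySem.List.pyRange_one_eq_nil (by omega)]
    simp [pm_loop]
  | succ m ih =>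
    intro k hk acc
    have h1 : k < (pp.length : Int) := by omega
    rw [PySem.List.pyRange_one_cons h1]
    by_cases hb : k = (pp.length : Int) - 1
    · rw [PySem.List.pyRange_one_eq_nil (by omega)]
      simp [pm_loop, hb]
    · have h2 : k < (pp.length : Int) - 1 := by omega
      rw [PySem.List.pyRange_one_cons h2]
      simp only [pm_loop, if_neg hb, List.flatMap_cons]
      rw [ih (k + 1) (by omega)]
      simp [List.append_assoc]

-- indexing helpers (Nat-side view of the pyGetD accesses)
theorem ppget (x : List (List Int)) (j : Nat) (hj : j < x.length) :
    (x.map pm_pi_rec).getD j [] = pm_pi_rec (x.getD j []) := by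
  rw [List.getD_eq_getElem _ _ (by simpa using hj), List.getD_eq_getElem _ _ hj, List.getElem_map]

theorem getD_mem (x : List (List Int)) (j : Nat) (hj : j < x.length) : x.getD j [] ∈ x := by
  rw [List.getD_eq_getElem _ _ hj]; exact List.getElem_mem hj

theorem mem_getD (x : List (List Int)) (sub : List Int) (h : sub ∈ x) :
    ∃ j : Nat, j < x.length ∧ x.getD j [] = sub := by
  obtain ⟨j, hj, rfl⟩ := List.mem_iff_getElem.mp h
  exact ⟨j, hj, by rw [List.getD_eq_getElem _ _ hj]⟩

-- membership in the flatMap of adjacent merge2's = "at least two sublists and p occurs somewhere"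
theorem mem_flat (x : List (List Int)) (p : Int)
    (hp : p = 2 ∨ (2 < p ∧ PySem.Int.mod p 2 ≠ 0)) :
    (p ∈ (PySem.List.pyRange 0 (((x.map pm_pi_rec).length : Int) - 1) 1).flatMap
        (fun i => pm_merge2 (PySem.List.pyGetD (x.map pm_pi_rec) i [])
                            (PySem.List.pyGetD (x.map pm_pi_rec) (i + 1) [])))
      ↔ (2 ≤ x.length ∧ ∃ sub ∈ x, p ∈ sub) := by
  rw [List.mem_flatMap]
  constructor
  · rintro ⟨i, hi, hm⟩
    rw [PySem.List.mem_pyRange_one] at hi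
    simp only [List.length_map] at hi
    simp only [mem_merge2] at hm
    rw [PySem.List.pyGetD_of_nonneg _ _ (by omega), PySem.List.pyGetD_of_nonneg _ _ (by omega)] at hm
    have e2 : (i + 1).toNat = i.toNat + 1 := by omega
    rw [e2, ppget x i.toNat (by omega), ppget x (i.toNat + 1) (by omega),
        mem_primes_in p hp, mem_primes_in p hp] at hm
    refine ⟨by omega, ?_⟩
    rcases hm with h | h
    · exact ⟨_, getD_mem x i.toNat (by omega), h⟩
    · exact ⟨_, getD_mem x (i.toNat + 1) (by omega), h⟩
  · rintro ⟨h2, sub, hs, hm⟩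
    obtain ⟨j, hj, hsub⟩ := mem_getD x sub hs
    by_cases hlast : j + 1 < x.length
    · refine ⟨(j : Int), ?_, ?_⟩
      · rw [PySem.List.mem_pyRange_one]; simp only [List.length_map]; omega
      · simp only [mem_merge2]
        left
        rw [PySem.List.pyGetD_of_nonneg _ _ (by omega)]
        have e1 : ((j : Int)).toNat = j := by omega
        rw [e1, ppget x j (by omega), mem_primes_in p hp, hsub]; exact hm
    · have hj1 : 1 ≤ j := by omega
      refine ⟨((j : Int) - 1), ?_, ?_⟩
      · rw [PySem.List.mem_pyRange_one]; simp only [List.length_map]; omega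
      · simp only [mem_merge2]
        right
        rw [PySem.List.pyGetD_of_nonneg _ _ (by omega)]
        have e1 : ((j : Int) - 1 + 1).toNat = j := by omega
        rw [e1, ppget x j (by omega), mem_primes_in p hp, hsub]; exact hm

-- membership in B's union set
theorem hmemB (x : List (List Int)) (p : Int) :
    (PySem.Set.contains
        (x.foldl (fun s sub => PySem.Set.update s sub) PySem.Set.empty) p = true)
      ↔ ∃ sub ∈ x, p ∈ sub := by
  rw [PySem.Set.contains_iff, mem_foldl_update]
  simp [PySem.Set.empty]

-- both ports as filters of Plit
theorem hA_char (x : List (List Int)) (hpre : Pre_prime_misses x) :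
    prime_misses x = Plit.filter (fun p =>
      !(decide ((2 ≤ x.length ∧ ∃ sub ∈ x, p ∈ sub)))) := by
  have hPl : ∀ p ∈ Plit, p = 2 ∨ (2 < p ∧ PySem.Int.mod p 2 ≠ 0) := by decide
  have hmap : x.map pm_primes_in = x.map pm_pi_rec :=
    List.map_congr_left (fun sub hs => primes_in_eq sub (hpre sub hs))
  simp only [prime_misses]
  rw [hPrimes, PySem.List.foldl_append_singleton_eq_map, List.nil_append, hmap,
      pm_loop_eq (x.map pm_pi_rec) ((((x.map pm_pi_rec).length : Int)) - 0).toNat 0 rfl [],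
      List.nil_append, merge4_P]
  apply List.filter_congr
  intro p hpP
  congr 1
  rw [Bool.eq_iff_iff, List.contains_iff_mem, PySem.List.mem_sorted,
      mem_flat x p (hPl p hpP)]
  simp

theorem hB_char (x : List (List Int)) :
    prime_misses_alt x = Plit.filter (fun p =>
      !(decide (∃ sub ∈ x, p ∈ sub))) := by
  simp only [prime_misses_alt]
  rw [filter_and, hSieve]
  apply List.filter_congr
  intro p _
  congr 1
  rw [Bool.eq_iff_iff, hmemB]
  simp

-- ===== VERDICT =====
theorem prime_misses_spec : Claim_unchanged_prime_misses := by
  intro x _ hpre hD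
  rw [hA_char x hpre, hB_char]
  apply List.filter_congr
  intro p hpP
  congr 1
  rw [Bool.eq_iff_iff]
  simp only [decide_eq_true_eq]
  constructor
  · rintro ⟨_, h⟩; exact h
  · rintro ⟨sub, hs, hm⟩
    refine ⟨?_, sub, hs, hm⟩
    by_contra hlt
    have h1 : x.length = 1 := by
      have : x ≠ [] := by rintro rfl; simp at hs
      have := List.length_pos_iff.mpr this
      omega
    obtain ⟨a, rfl⟩ := List.length_eq_one_iff.mp h1
    have : sub = a := by simpa using hs
    exact hD ⟨rfl, p, hpP, by simpa [this ▸ hm]⟩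

set_option maxRecDepth 20000 in
theorem prime_misses_changed : Claim_changed_prime_misses := by
  unfold Claim_changed_prime_misses; decide

theorem prime_misses_tight : Claim_exact_prime_misses := by
  intro x _ hpre hD heq
  obtain ⟨hlen, p, hpP, hph⟩ := hD
  obtain ⟨a, rfl⟩ := List.length_eq_one_iff.mp hlen
  have hpa : p ∈ a := by simpa using hph
  have hpA : p ∈ prime_misses [a] := by
    rw [hA_char [a] hpre, List.mem_filter]
    exact ⟨hpP, by simp⟩
  rw [heq, hB_char, List.mem_filter] at hpA
  have h2 := hpA.2
  simp at h2
  exact h2 hpa
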